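-- pv_equiv track=rewrite | github.com/GrayGhostDev/ToolboxAI-Solutions | core/agents/github_agents/rollback_management_agent.py | _calculate_failure_severity
-- ===== SOURCE A (Python) =====
-- from typing import Any, Optional
--
-- def _calculate_failure_severity(failure_indicators: list[dict[str, Any]]) -> str:
--     """Calculate overall failure severity from indicators."""
--     if not failure_indicators:
--         return "none"
--
--     severities = [indicator["severity"] for indicator in failure_indicators]
--
--     if "critical" in severities:
--         return "critical"
--     elif "high" in severities:
--         return "high"
--     elif "medium" in severities:
--         return "medium"
--     else:
--         return "low"
-- ===== SOURCE B (Python) =====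
-- _RANK = {"critical": 3, "high": 2, "medium": 1}
-- _NAME = {3: "critical", 2: "high", 1: "medium", 0: "low"}
--
-- def _calculate_failure_severity(failure_indicators: list) -> str:
--     """Calculate overall failure severity from indicators."""
--     if not failure_indicators:
--         return "none"
--     m = 0
--     for indicator in failure_indicators:
--         m = max(m, _RANK.get(indicator["severity"], 0))
--     return _NAME[m]
-- ===== Notes on version B (the rewrite author's own statement) =====
-- stated objective: simpler
-- what changed: Replaces the list comprehension plus four ordered membership scans with a single pass that keeps the maximum numeric rank (critical=3, high=2, medium=1, else 0) and maps the max rank back to its name.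
import Mathlib
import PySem

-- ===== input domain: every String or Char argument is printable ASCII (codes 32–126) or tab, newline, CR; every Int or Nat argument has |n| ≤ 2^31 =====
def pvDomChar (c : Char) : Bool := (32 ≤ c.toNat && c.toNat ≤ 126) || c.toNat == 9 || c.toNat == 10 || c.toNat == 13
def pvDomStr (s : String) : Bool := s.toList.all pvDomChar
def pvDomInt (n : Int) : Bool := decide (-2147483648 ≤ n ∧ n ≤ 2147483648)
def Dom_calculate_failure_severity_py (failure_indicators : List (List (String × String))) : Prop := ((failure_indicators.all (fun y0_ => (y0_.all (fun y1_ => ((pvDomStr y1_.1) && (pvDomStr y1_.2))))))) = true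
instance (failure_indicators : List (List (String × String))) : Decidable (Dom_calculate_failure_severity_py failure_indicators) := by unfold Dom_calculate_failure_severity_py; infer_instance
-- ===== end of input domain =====

-- ===== PORT A =====
-- B replaces A's four ordered membership scans by a single max-rank pass (simpler, one reduction);
-- proved equal on inputs where every indicator has a "severity" key (Pre_ excludes Python's KeyError).
def calculate_failure_severity_py (failure_indicators : List (List (String × String))) : String :=
  if failure_indicators = [] then "none"
  else
    -- indicator["severity"]: first-match lookup; a missing key (KeyError) is excluded by Pre_,
    -- so the `getD ""` default is never taken on admitted inputs.
    let severities := failure_indicators.map (fun d => ((PySem.Dict.mk d).get? "severity").getD "")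
    if severities.contains "critical" then "critical"
    else if severities.contains "high" then "high"
    else if severities.contains "medium" then "medium"
    else "low"

-- ===== PORT B =====
-- _RANK.get(s, 0)
def sevRank (s : String) : Nat :=
  if s = "critical" then 3 else if s = "high" then 2 else if s = "medium" then 1 else 0

-- _NAME[m] (m is always in {0,1,2,3})
def sevName (m : Nat) : String :=
  match m with
  | 3 => "critical"
  | 2 => "high"
  | 1 => "medium"
  | _ => "low"

def calculate_failure_severity_py_alt (failure_indicators : List (List (String × String))) : String :=
  if failure_indicators = [] then "none"
  else
    sevName (failure_indicators.foldl
      (fun m d => max m (sevRank (((PySem.Dict.mk d).get? "severity").getD ""))) 0)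

-- ===== PRECONDITION & SPEC =====
-- Pre_ excludes exactly the inputs where some indicator lacks the "severity" key, on which
-- the Python A raises KeyError.
def Pre_calculate_failure_severity_py (failure_indicators : List (List (String × String))) : Prop :=
  ∀ d ∈ failure_indicators, (d.any (fun p => p.1 == "severity")) = true
instance (failure_indicators : List (List (String × String))) : Decidable (Pre_calculate_failure_severity_py failure_indicators) := by unfold Pre_calculate_failure_severity_py; infer_instance

def pvWitness_calculate_failure_severity_py : (List (List (String × String))) := [[("severity", "high")], [("severity", "low")]]

def Spec_calculate_failure_severity_py (failure_indicators : List (List (String × String))) (out : String) : Prop := out = calculate_failure_severity_py_alt failure_indicators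
instance (failure_indicators : List (List (String × String))) (out : String) : Decidable (Spec_calculate_failure_severity_py failure_indicators out) := by unfold Spec_calculate_failure_severity_py; infer_instance

-- ===== CLAIM (what is proved, stated in full; the proofs are below) =====
def Claim_equal_calculate_failure_severity_py : Prop := ∀ (failure_indicators : List (List (String × String))), Dom_calculate_failure_severity_py failure_indicators → Pre_calculate_failure_severity_py failure_indicators → Spec_calculate_failure_severity_py failure_indicators (calculate_failure_severity_py failure_indicators)

-- ===== LEMMAS AND PROOFS =====

theorem sevRank_le (s : String) : sevRank s ≤ 3 := by
  unfold sevRank; split_ifs <;> omega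

theorem sevRank_eq3 (s : String) : 3 ≤ sevRank s ↔ s = "critical" := by
  unfold sevRank; split_ifs <;> simp_all

theorem sevRank_ge2 (s : String) : 2 ≤ sevRank s ↔ s = "critical" ∨ s = "high" := by
  unfold sevRank; split_ifs <;> simp_all

theorem sevRank_ge1 (s : String) : 1 ≤ sevRank s ↔ s = "critical" ∨ s = "high" ∨ s = "medium" := by
  unfold sevRank; split_ifs <;> simp_all

-- fold of the rank maximum, with the accumulator pulled out
theorem foldl_max_rank (l : List String) (a : Nat) :
    l.foldl (fun m s => max m (sevRank s)) a = max a (l.foldl (fun m s => max m (sevRank s)) 0) := by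
  induction l generalizing a with
  | nil => simp
  | cons x xs ih =>
      simp only [List.foldl_cons]
      rw [ih (max a (sevRank x)), ih (max 0 (sevRank x))]
      simp [Nat.max_assoc]

theorem gmax_le (l : List String) : l.foldl (fun m s => max m (sevRank s)) 0 ≤ 3 := by
  induction l with
  | nil => simp
  | cons x xs ih =>
      simp only [List.foldl_cons]
      rw [foldl_max_rank]
      have := sevRank_le x
      omega

theorem gmax_ge (l : List String) (k : Nat) (hk : 1 ≤ k) :
    k ≤ l.foldl (fun m s => max m (sevRank s)) 0 ↔ ∃ s ∈ l, k ≤ sevRank s := by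
  induction l with
  | nil => simp; omega
  | cons x xs ih =>
      simp only [List.foldl_cons]
      rw [foldl_max_rank]
      constructor
      · intro h
        rcases le_max_iff.mp h with h | h
        · exact ⟨x, by simp, by simpa using h⟩
        · obtain ⟨s, hs, hr⟩ := ih.mp h
          exact ⟨s, by simp [hs], hr⟩
      · rintro ⟨s, hs, hr⟩
        rcases List.mem_cons.mp hs with rfl | hs
        · exact le_max_iff.mpr (Or.inl (by simpa using hr))
        · exact le_max_iff.mpr (Or.inr (ih.mpr ⟨s, hs, hr⟩))

-- ===== VERDICT (by name: the statement is the Claim_ definition above) =====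
theorem calculate_failure_severity_py_spec : Claim_equal_calculate_failure_severity_py := by
  intro fi _ _
  unfold Spec_calculate_failure_severity_py calculate_failure_severity_py calculate_failure_severity_py_alt
  by_cases hnil : fi = []
  · simp [hnil]
  · simp only [hnil, if_false]
    set l := fi.map (fun d => ((PySem.Dict.mk d).get? "severity").getD "") with hl
    rw [show (fi.foldl (fun m d => max m (sevRank (((PySem.Dict.mk d).get? "severity").getD ""))) 0)
          = l.foldl (fun m s => max m (sevRank s)) 0 by
        rw [hl, List.foldl_map]]
    set g := l.foldl (fun m s => max m (sevRank s)) 0 with hg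
    have hle : g ≤ 3 := gmax_le l
    have h3 : 3 ≤ g ↔ "critical" ∈ l := by
      rw [hg, gmax_ge l 3 (by omega)]
      constructor
      · rintro ⟨s, hs, hr⟩; rwa [(sevRank_eq3 s).mp hr] at hs
      · intro h; exact ⟨_, h, (sevRank_eq3 _).mpr rfl⟩
    have h2 : 2 ≤ g ↔ ("critical" ∈ l ∨ "high" ∈ l) := by
      rw [hg, gmax_ge l 2 (by omega)]
      constructor
      · rintro ⟨s, hs, hr⟩
        rcases (sevRank_ge2 s).mp hr with rfl | rfl
        · exact Or.inl hs
        · exact Or.inr hs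
      · rintro (h | h)
        · exact ⟨_, h, (sevRank_ge2 _).mpr (Or.inl rfl)⟩
        · exact ⟨_, h, (sevRank_ge2 _).mpr (Or.inr rfl)⟩
    have h1 : 1 ≤ g ↔ ("critical" ∈ l ∨ "high" ∈ l ∨ "medium" ∈ l) := by
      rw [hg, gmax_ge l 1 (by omega)]
      constructor
      · rintro ⟨s, hs, hr⟩
        rcases (sevRank_ge1 s).mp hr with rfl | rfl | rfl
        · exact Or.inl hs
        · exact Or.inr (Or.inl hs)
        · exact Or.inr (Or.inr hs)
      · rintro (h | h | h)
        · exact ⟨_, h, (sevRank_ge1 _).mpr (Or.inl rfl)⟩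
        · exact ⟨_, h, (sevRank_ge1 _).mpr (Or.inr (Or.inl rfl))⟩
        · exact ⟨_, h, (sevRank_ge1 _).mpr (Or.inr (Or.inr rfl))⟩
    by_cases hc : "critical" ∈ l
    · have hcg : g = 3 := by have := h3.mpr hc; omega
      simp [hc, hcg, sevName]
    · by_cases hh : "high" ∈ l
      · have hcg : g = 2 := by
          have h2' := h2.mpr (Or.inr hh)
          have h3' : ¬ 3 ≤ g := fun h => hc (h3.mp h)
          omega
        simp [hc, hh, hcg, sevName]
      · by_cases hm : "medium" ∈ l
        · have hcg : g = 1 := by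
            have h1' := h1.mpr (Or.inr (Or.inr hm))
            have h2' : ¬ 2 ≤ g := fun h => (h2.mp h).elim hc hh
            omega
          simp [hc, hh, hm, hcg, sevName]
        · have hcg : g = 0 := by
            have h1' : ¬ 1 ≤ g := fun h => (h1.mp h).elim hc (fun h => h.elim hh hm)
            omega
          simp [hc, hh, hm, hcg, sevName]
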